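-- pv_equiv track=rewrite | github.com/bgoonz/awesome-4-new-developers | OVERFLOW/DS-ALGO-OFFICIAL/temp/Python/project_euler/problem_070/sol1.py | solution
-- ===== SOURCE A (Python) =====
-- from typing import List
--
-- def get_totients(max_one: int) -> List[int]:
--     """
--     Calculates a list of totients from 0 to max_one exclusive, using the
--     definition of Euler's product formula.
--
--     >>> get_totients(5)
--     [0, 1, 1, 2, 2]
--
--     >>> get_totients(10)
--     [0, 1, 1, 2, 2, 4, 2, 6, 4, 6]
--     """
--     totients = [0] * max_one
--
--     for i in range(0, max_one):
--         totients[i] = i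
--
--     for i in range(2, max_one):
--         if totients[i] == i:
--             for j in range(i, max_one, i):
--                 totients[j] -= totients[j] // i
--
--     return totients
--
-- def has_same_digits(num1: int, num2: int) -> bool:
--     """
--     Return True if num1 and num2 have the same frequency of every digit, False
--     otherwise.
--
--     digits[] is a frequency table where the index represents the digit from
--     0-9, and the element stores the number of appearances. Increment the
--     respective index every time you see the digit in num1, and decrement if in
--     num2. At the end, if the numbers have the same digits, every index must
--     contain 0.
--
--     >>> has_same_digits(123456789, 987654321)
--     True
--
--     >>> has_same_digits(123, 12)
--     False
--
--     >>> has_same_digits(1234566, 123456)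
--     False
--     """
--     digits = [0] * 10
--
--     while num1 > 0 and num2 > 0:
--         digits[num1 % 10] += 1
--         digits[num2 % 10] -= 1
--         num1 //= 10
--         num2 //= 10
--
--     for digit in digits:
--         if digit != 0:
--             return False
--
--     return True
--
-- def solution(max: int = 10000000) -> int:
--     """
--     Finds the value of n from 1 to max such that n/φ(n) produces a minimum.
--
--     >>> solution(100)
--     21
--
--     >>> solution(10000)
--     4435
--     """
--
--     min_numerator = 1  # i
--     min_denominator = 0  # φ(i)
--     totients = get_totients(max + 1)
--
--     for i in range(2, max + 1):
--         t = totients[i]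
--
--         if i * min_denominator < min_numerator * t and has_same_digits(i, t):
--             min_numerator = i
--             min_denominator = t
--
--     return min_numerator
-- ===== SOURCE B (Python) =====
-- def _same_digits(num1, num2):
--     a, b = [], []
--     while num1 > 0 and num2 > 0:
--         a.append(num1 % 10)
--         b.append(num2 % 10)
--         num1 //= 10
--         num2 //= 10
--     return sorted(a) == sorted(b)
--
--
-- def solution(max: int = 10000000) -> int:
--     max_one = max + 1
--     # smallest-prime-factor table: spf[j] = least prime factor of j (spf[j] = j if j prime)
--     spf = list(range(max_one))
--     for i in range(2, max_one):
--         if spf[i] == i: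
--             for j in range(i * i, max_one, i):
--                 if spf[j] == j:
--                     spf[j] = i
--     # totients by the multiplicative recurrence over the smallest prime factor
--     phi = [0] * max_one
--     if max_one > 1:
--         phi[1] = 1
--     for i in range(2, max_one):
--         p = spf[i]
--         m = i // p
--         phi[i] = phi[m] * p if m % p == 0 else phi[m] * (p - 1)
--     best_n = 1
--     best_t = 0
--     for i in range(2, max_one):
--         t = phi[i]
--         if i * best_t < best_n * t and _same_digits(i, t):
--             best_n = i
--             best_t = t
--     return best_n
-- ===== Notes on version B (the rewrite author's own statement) =====
-- stated objective: alternative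
-- what changed: B computes totients from a smallest-prime-factor table built by a separate sieve plus the multiplicative recurrence phi[i] = phi[i//p]*(p if p divides i//p else p-1), instead of A's in-place subtractive Euler-product sieve, and decides the digit test by comparing sorted digit lists instead of a +/- frequency counter.
import Mathlib
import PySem

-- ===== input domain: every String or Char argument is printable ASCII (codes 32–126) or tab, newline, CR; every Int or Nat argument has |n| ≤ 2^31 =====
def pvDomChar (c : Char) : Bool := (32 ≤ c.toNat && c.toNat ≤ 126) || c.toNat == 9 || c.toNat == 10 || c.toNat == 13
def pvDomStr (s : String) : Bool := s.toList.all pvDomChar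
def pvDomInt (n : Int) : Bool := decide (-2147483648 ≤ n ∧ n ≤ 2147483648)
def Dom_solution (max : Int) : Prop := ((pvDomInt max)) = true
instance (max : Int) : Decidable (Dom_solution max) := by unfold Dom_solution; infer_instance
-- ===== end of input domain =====

-- B replaces A's in-place subtractive Euler-product totient sieve by a smallest-prime-factor
-- table plus the multiplicative recurrence phi[i] = phi[i//p]*(p or p-1), and the digit test by
-- comparing sorted digit lists instead of a +/- frequency counter (alternative algorithm, same cost).


-- ===== PORT A =====
-- termination helper for the digit-consuming while loops (num1 //= 10 shrinks)
theorem pv_div10_lt (n : Int) (h : 0 < n) : (PySem.Int.floordiv n 10).toNat < n.toNat := by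
  rw [PySem.Int.floordiv_eq_ediv_of_pos (by norm_num)]
  omega

-- the `while num1 > 0 and num2 > 0` loop of has_same_digits, acting on the 10-slot counter
def hsdLoop (digits : List Int) (num1 num2 : Int) : List Int :=
  if h : 0 < num1 ∧ 0 < num2 then
    let d1 := PySem.List.pySetD digits (PySem.Int.mod num1 10)
        (PySem.List.pyGetD digits (PySem.Int.mod num1 10) 0 + 1)
    let d2 := PySem.List.pySetD d1 (PySem.Int.mod num2 10)
        (PySem.List.pyGetD d1 (PySem.Int.mod num2 10) 0 - 1)
    hsdLoop d2 (PySem.Int.floordiv num1 10) (PySem.Int.floordiv num2 10)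
  else digits
termination_by num1.toNat
decreasing_by exact pv_div10_lt num1 h.1

def has_same_digits (num1 num2 : Int) : Bool :=
  (hsdLoop (List.replicate 10 0) num1 num2).all (fun d => d == 0)

def get_totients (max_one : Int) : List Int :=
  let t0 := List.replicate max_one.toNat 0
  let t1 := (PySem.List.pyRange 0 max_one 1).foldl
      (fun t i => PySem.List.pySetD t i i) t0
  (PySem.List.pyRange 2 max_one 1).foldl
    (fun t i =>
      if PySem.List.pyGetD t i 0 == i then
        (PySem.List.pyRange i max_one i).foldl
          (fun t j => PySem.List.pySetD t j
            (PySem.List.pyGetD t j 0 - PySem.Int.floordiv (PySem.List.pyGetD t j 0) i)) t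
      else t)
    t1

def solution (max : Int) : Int :=
  let totients := get_totients (max + 1)
  ((PySem.List.pyRange 2 (max + 1) 1).foldl
    (fun (s : Int × Int) i =>
      let t := PySem.List.pyGetD totients i 0
      if i * s.2 < s.1 * t ∧ has_same_digits i t = true then (i, t) else s)
    (1, 0)).1

-- ===== PORT B =====
-- the digit-collecting while loop of B's _same_digits
def sdLoop (a b : List Int) (num1 num2 : Int) : List Int × List Int :=
  if _h : 0 < num1 ∧ 0 < num2 then
    sdLoop (a ++ [PySem.Int.mod num1 10]) (b ++ [PySem.Int.mod num2 10])
      (PySem.Int.floordiv num1 10) (PySem.Int.floordiv num2 10)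
  else (a, b)
termination_by num1.toNat
decreasing_by exact pv_div10_lt num1 _h.1

def same_digits (num1 num2 : Int) : Bool :=
  let p := sdLoop [] [] num1 num2
  PySem.List.sorted p.1 (fun x => x) false == PySem.List.sorted p.2 (fun x => x) false

def solution_alt (max : Int) : Int :=
  let max_one := max + 1
  let spf0 := PySem.List.pyRange 0 max_one 1
  let spf := (PySem.List.pyRange 2 max_one 1).foldl
    (fun s i =>
      if PySem.List.pyGetD s i 0 == i then
        (PySem.List.pyRange (i * i) max_one i).foldl
          (fun s j => if PySem.List.pyGetD s j 0 == j then PySem.List.pySetD s j i else s) s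
      else s) spf0
  let phi0 := List.replicate max_one.toNat 0
  let phi1 := if 1 < max_one then PySem.List.pySetD phi0 1 1 else phi0
  let phi := (PySem.List.pyRange 2 max_one 1).foldl
    (fun ph i =>
      let p := PySem.List.pyGetD spf i 0
      let m := PySem.Int.floordiv i p
      PySem.List.pySetD ph i
        (if PySem.Int.mod m p == 0 then PySem.List.pyGetD ph m 0 * p
         else PySem.List.pyGetD ph m 0 * (p - 1))) phi1
  ((PySem.List.pyRange 2 max_one 1).foldl
    (fun (s : Int × Int) i =>
      let t := PySem.List.pyGetD phi i 0
      if i * s.2 < s.1 * t ∧ same_digits i t = true then (i, t) else s)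
    (1, 0)).1

-- ===== PRECONDITION & SPEC =====
def Spec_solution (max : Int) (out : Int) : Prop := out = solution_alt max
instance (max : Int) (out : Int) : Decidable (Spec_solution max out) := by unfold Spec_solution; infer_instance

-- ===== CLAIM (what is proved, stated in full; the proofs are below) =====
def Claim_equal_solution : Prop := ∀ (max : Int), Dom_solution max → Spec_solution max (solution max)

-- ===== LEMMAS AND PROOFS =====
-- ---- generic pointwise machinery for the strided update folds ----

theorem pv_getD_oob (xs : List Int) (i d : Int) (h0 : 0 ≤ i) (h : (xs.length : Int) ≤ i) :
    PySem.List.pyGetD xs i d = d := by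
  have h2 : ¬ (i < (xs.length : Int)) := not_lt.2 h
  simp [PySem.List.pyGetD, PySem.List.pyGet?, PySem.List.pyIdx?, h0, h2]

theorem pv_setD_getD_self (t : List Int) (j : Int) (hj : 0 ≤ j) :
    PySem.List.pySetD t j (PySem.List.pyGetD t j 0) = t := by
  rw [PySem.List.pySetD_of_nonneg t _ hj]
  by_cases h : j < (t.length : Int)
  · rw [PySem.List.pyGetD_eq_getElem t 0 hj h]
    exact List.set_getElem_self (by omega)
  · exact List.set_eq_of_length_le (by omega)

theorem pv_getD_setD (t : List Int) (j v k : Int) (hj : 0 ≤ j) (hjl : j < (t.length : Int))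
    (hk : 0 ≤ k) :
    PySem.List.pyGetD (PySem.List.pySetD t j v) k 0
      = if k = j then v else PySem.List.pyGetD t k 0 := by
  rw [PySem.List.pySetD_of_nonneg t _ hj]
  have hlen : (t.set j.toNat v).length = t.length := by simp
  by_cases hkj : k = j
  · subst hkj
    rw [if_pos rfl, PySem.List.pyGetD_eq_getElem _ 0 hk (by rw [hlen]; omega)]
    exact List.getElem_set_self (by omega)
  · rw [if_neg hkj]
    by_cases hkl : k < (t.length : Int)
    · rw [PySem.List.pyGetD_eq_getElem _ 0 hk (by rw [hlen]; exact hkl),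
        PySem.List.pyGetD_eq_getElem t 0 hk hkl]
      exact List.getElem_set_ne (show j.toNat ≠ k.toNat by omega) (by rw [hlen]; omega)
    · rw [pv_getD_oob (t.set j.toNat v) k 0 hk (by rw [hlen]; omega), pv_getD_oob t k 0 hk (by omega)]

-- the shape of every table-update loop in both ports
def updBody (g : Int → Int → Int) (t : List Int) (j : Int) : List Int :=
  PySem.List.pySetD t j (g j (PySem.List.pyGetD t j 0))

theorem foldl_upd_length (g : Int → Int → Int) :
    ∀ (L : List Int) (t : List Int), (L.foldl (updBody g) t).length = t.length := by
  intro L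
  induction L with
  | nil => intro t; rfl
  | cons j L ih => intro t; simp [List.foldl_cons, ih, updBody, PySem.List.length_pySetD]

theorem foldl_upd_get (g : Int → Int → Int) :
    ∀ (L : List Int) (t : List Int), L.Pairwise (· < ·) →
      (∀ j ∈ L, 0 ≤ j ∧ j < (t.length : Int)) →
      ∀ k : Int, 0 ≤ k →
        PySem.List.pyGetD (L.foldl (updBody g) t) k 0
          = if k ∈ L then g k (PySem.List.pyGetD t k 0) else PySem.List.pyGetD t k 0 := by
  intro L
  induction L with
  | nil => intro t _ _ k _; simp
  | cons j L ih =>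
    intro t hpw hb k hk
    obtain ⟨hj0, hjl⟩ := hb j (List.mem_cons_self)
    have hlen' : ((updBody g t j).length : Int) = (t.length : Int) := by
      simp [updBody, PySem.List.length_pySetD]
    rw [List.foldl_cons]
    rw [ih (updBody g t j) hpw.of_cons
      (fun x hx => by rw [hlen']; exact hb x (List.mem_cons_of_mem _ hx)) k hk]
    by_cases hkj : k = j
    · subst hkj
      have hknotL : k ∉ L := fun hmem => lt_irrefl k (List.rel_of_pairwise_cons hpw hmem)
      rw [if_neg hknotL, if_pos (List.mem_cons_self)]
      simp only [updBody]
      rw [pv_getD_setD t _ _ _ hj0 hjl hk, if_pos rfl]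
    · have : PySem.List.pyGetD (updBody g t j) k 0 = PySem.List.pyGetD t k 0 := by
        simp only [updBody]
        rw [pv_getD_setD t _ _ _ hj0 hjl hk, if_neg hkj]
      rw [this]
      by_cases hkL : k ∈ L
      · rw [if_pos hkL, if_pos (List.mem_cons_of_mem _ hkL)]
      · rw [if_neg hkL, if_neg (by simp [hkj, hkL])]

theorem pv_pyRange_pos_pairwise (a b s : Int) (hs : 0 < s) :
    (PySem.List.pyRange a b s).Pairwise (· < ·) := by
  rw [PySem.List.pyRange_of_pos a b hs]
  refine List.Pairwise.map _ (fun x y hxy => ?_) (List.pairwise_lt_range)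
  have : (x : Int) < (y : Int) := by exact_mod_cast hxy
  have := mul_lt_mul_of_pos_left this hs
  omega

-- ---- the two digit tests agree ----

theorem sdLoop_append : ∀ (n : ℕ) (num1 num2 : Int), num1.toNat = n → ∀ a b : List Int,
    sdLoop a b num1 num2
      = (a ++ (sdLoop [] [] num1 num2).1, b ++ (sdLoop [] [] num1 num2).2) := by
  intro n
  induction n using Nat.strong_induction_on with
  | _ n ih =>
    intro num1 num2 hn a b
    by_cases h : 0 < num1 ∧ 0 < num2
    · have hlt : (PySem.Int.floordiv num1 10).toNat < n := hn ▸ pv_div10_lt num1 h.1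
      have ih1 := ih _ hlt (PySem.Int.floordiv num1 10) (PySem.Int.floordiv num2 10) rfl
      rw [sdLoop, dif_pos h, ih1]
      conv_rhs => rw [sdLoop, dif_pos h, ih1]
      simp
    · rw [sdLoop, dif_neg h]
      conv_rhs => rw [sdLoop, dif_neg h]
      simp

theorem sdLoop_mem : ∀ (n : ℕ) (num1 num2 : Int), num1.toNat = n → ∀ x : Int,
    (x ∈ (sdLoop [] [] num1 num2).1 ∨ x ∈ (sdLoop [] [] num1 num2).2) → 0 ≤ x ∧ x < 10 := by
  intro n
  induction n using Nat.strong_induction_on with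
  | _ n ih =>
    intro num1 num2 hn x hx
    by_cases h : 0 < num1 ∧ 0 < num2
    · have hlt : (PySem.Int.floordiv num1 10).toNat < n := hn ▸ pv_div10_lt num1 h.1
      rw [sdLoop, dif_pos h,
        sdLoop_append _ (PySem.Int.floordiv num1 10) (PySem.Int.floordiv num2 10) rfl] at hx
      simp only [List.mem_append, List.nil_append, List.mem_cons, List.not_mem_nil, or_false] at hx
      rcases hx with (hx | hx) | (hx | hx)
      · subst hx
        exact ⟨PySem.Int.mod_nonneg num1 (by norm_num), PySem.Int.mod_lt num1 (by norm_num)⟩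
      · exact ih _ hlt _ _ rfl x (Or.inl hx)
      · subst hx
        exact ⟨PySem.Int.mod_nonneg num2 (by norm_num), PySem.Int.mod_lt num2 (by norm_num)⟩
      · exact ih _ hlt _ _ rfl x (Or.inr hx)
    · rw [sdLoop, dif_neg h] at hx
      simp at hx

theorem hsdLoop_spec : ∀ (n : ℕ) (num1 num2 : Int), num1.toNat = n → ∀ D : List Int,
    D.length = 10 →
    (hsdLoop D num1 num2).length = 10 ∧
    ∀ d : Int, 0 ≤ d → d < 10 →
      PySem.List.pyGetD (hsdLoop D num1 num2) d 0
        = PySem.List.pyGetD D d 0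
          + (((sdLoop [] [] num1 num2).1.count d : ℕ) : Int)
          - (((sdLoop [] [] num1 num2).2.count d : ℕ) : Int) := by
  intro n
  induction n using Nat.strong_induction_on with
  | _ n ih =>
    intro num1 num2 hn D hD
    by_cases h : 0 < num1 ∧ 0 < num2
    · have hlt : (PySem.Int.floordiv num1 10).toNat < n := hn ▸ pv_div10_lt num1 h.1
      set m1 := PySem.Int.mod num1 10 with hm1
      set m2 := PySem.Int.mod num2 10 with hm2
      have hb1 : 0 ≤ m1 ∧ m1 < 10 :=
        ⟨PySem.Int.mod_nonneg num1 (by norm_num), PySem.Int.mod_lt num1 (by norm_num)⟩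
      have hb2 : 0 ≤ m2 ∧ m2 < 10 :=
        ⟨PySem.Int.mod_nonneg num2 (by norm_num), PySem.Int.mod_lt num2 (by norm_num)⟩
      set D1 := PySem.List.pySetD D m1 (PySem.List.pyGetD D m1 0 + 1) with hD1
      set D2 := PySem.List.pySetD D1 m2 (PySem.List.pyGetD D1 m2 0 - 1) with hD2
      have hD1l : D1.length = 10 := by rw [hD1, PySem.List.length_pySetD, hD]
      have hD2l : D2.length = 10 := by rw [hD2, PySem.List.length_pySetD, hD1l]
      have g1 : ∀ e : Int, 0 ≤ e → e < 10 →
          PySem.List.pyGetD D1 e 0 = PySem.List.pyGetD D e 0 + (if e = m1 then 1 else 0) := by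
        intro e he0 he1
        rw [hD1, pv_getD_setD D m1 _ e hb1.1 (by rw [hD]; exact_mod_cast hb1.2) he0]
        split_ifs with hem
        · subst hem; ring
        · ring
      have g2 : ∀ e : Int, 0 ≤ e → e < 10 →
          PySem.List.pyGetD D2 e 0 = PySem.List.pyGetD D e 0
            + (if e = m1 then 1 else 0) - (if e = m2 then 1 else 0) := by
        intro e he0 he1
        rw [hD2, pv_getD_setD D1 m2 _ e hb2.1 (by rw [hD1l]; exact_mod_cast hb2.2) he0]
        by_cases hem : e = m2
        · subst hem
          rw [if_pos rfl, g1 m2 he0 he1, if_pos rfl]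
        · rw [if_neg hem, g1 e he0 he1, if_neg hem]
          ring
      have ih1 := ih _ hlt (PySem.Int.floordiv num1 10) (PySem.Int.floordiv num2 10) rfl D2 hD2l
      have unfL : hsdLoop D num1 num2
          = hsdLoop D2 (PySem.Int.floordiv num1 10) (PySem.Int.floordiv num2 10) := by
        rw [hsdLoop, dif_pos h]
      have unfR : sdLoop ([] : List Int) ([] : List Int) num1 num2
          = ([m1] ++ (sdLoop [] [] (PySem.Int.floordiv num1 10) (PySem.Int.floordiv num2 10)).1,
             [m2] ++ (sdLoop [] [] (PySem.Int.floordiv num1 10) (PySem.Int.floordiv num2 10)).2) := by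
        conv_lhs => rw [sdLoop, dif_pos h]
        rw [sdLoop_append _ (PySem.Int.floordiv num1 10) (PySem.Int.floordiv num2 10) rfl]
        simp only [List.nil_append]
        rfl
      refine ⟨by rw [unfL]; exact (ih1.1), ?_⟩
      intro d hd0 hd1
      rw [unfL, ih1.2 d hd0 hd1, unfR, g2 d hd0 hd1]
      simp only [List.count_append, List.count_singleton, beq_iff_eq]
      push_cast
      split_ifs <;> omega
    · have unfL : hsdLoop D num1 num2 = D := by rw [hsdLoop, dif_neg h]
      have unf0 : sdLoop ([] : List Int) ([] : List Int) num1 num2 = ([], []) := by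
        rw [sdLoop, dif_neg h]
      rw [unfL, unf0]
      exact ⟨hD, by intro d _ _; simp⟩

theorem hsd_eq_sd (num1 num2 : Int) : has_same_digits num1 num2 = same_digits num1 num2 := by
  apply Bool.coe_iff_coe.mp
  obtain ⟨hlen, hget⟩ := hsdLoop_spec num1.toNat num1 num2 rfl (List.replicate 10 0) (by simp)
  have hrep : ∀ d : Int, 0 ≤ d → d < 10 →
      PySem.List.pyGetD (List.replicate 10 (0 : Int)) d 0 = 0 := by
    intro d h0 h1
    rw [PySem.List.pyGetD_eq_getElem _ 0 h0 (by simp; omega)]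
    simp only [List.getElem_replicate]
  constructor
  · intro hall
    have hcnt : ∀ d : Int,
        (sdLoop [] [] num1 num2).1.count d = (sdLoop [] [] num1 num2).2.count d := by
      intro d
      by_cases hd : 0 ≤ d ∧ d < 10
      · have hx : PySem.List.pyGetD (hsdLoop (List.replicate 10 0) num1 num2) d 0 = 0 := by
          rw [PySem.List.pyGetD_eq_getElem _ 0 hd.1 (by rw [hlen]; exact_mod_cast hd.2)]
          have hmem := List.getElem_mem
            (show d.toNat < (hsdLoop (List.replicate 10 0) num1 num2).length by
              rw [hlen]; omega)
          unfold has_same_digits at hall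
          rw [List.all_eq_true] at hall
          simpa using hall _ hmem
        have := hget d hd.1 hd.2
        rw [hx, hrep d hd.1 hd.2] at this
        omega
      · rw [List.count_eq_zero.mpr, List.count_eq_zero.mpr]
        · intro hmem
          exact hd (sdLoop_mem num1.toNat num1 num2 rfl d (Or.inr hmem))
        · intro hmem
          exact hd (sdLoop_mem num1.toNat num1 num2 rfl d (Or.inl hmem))
    unfold same_digits
    rw [beq_iff_eq, PySem.List.sorted_id_eq_sorted_id_iff_perm]
    exact List.perm_iff_count.mpr hcnt
  · intro hsame
    unfold same_digits at hsame
    rw [beq_iff_eq, PySem.List.sorted_id_eq_sorted_id_iff_perm] at hsame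
    have hcnt := List.perm_iff_count.mp hsame
    unfold has_same_digits
    rw [List.all_eq_true]
    intro x hx
    obtain ⟨k, hk, hxk⟩ := List.mem_iff_getElem.mp hx
    have hk10 : k < 10 := by rw [hlen] at hk; exact hk
    have := hget (k : Int) (by positivity) (by exact_mod_cast hk10)
    rw [hrep (k : Int) (by positivity) (by exact_mod_cast hk10), hcnt] at this
    have hz : PySem.List.pyGetD (hsdLoop (List.replicate 10 0) num1 num2) (k : Int) 0 = x := by
      rw [PySem.List.pyGetD_eq_getElem _ 0 (by positivity) (by rw [hlen]; exact_mod_cast hk10)]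
      simpa using hxk
    rw [hz] at this
    simp only [beq_iff_eq]
    omega

-- ---- the value held by A's sieve after processing all primes < i ----

def smoothA (i j : ℕ) : ℕ := ∏ p ∈ j.primeFactors.filter (fun p => p < i), p ^ j.factorization p

def partA (i j : ℕ) : ℕ := (j / smoothA i j) * (smoothA i j).totient

theorem smoothA_pos (i j : ℕ) : 0 < smoothA i j := by
  refine Finset.prod_pos ?_
  intro p hp
  exact pow_pos (Nat.prime_of_mem_primeFactors (Finset.mem_filter.mp hp).1).pos _

theorem smoothA_dvd (i j : ℕ) : smoothA i j ∣ j := by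
  rcases Nat.eq_zero_or_pos j with hj | hj
  · subst hj; exact dvd_zero _
  have hfull : ∏ p ∈ j.primeFactors, p ^ j.factorization p = j := by
    rw [← Nat.support_factorization]
    exact Nat.prod_factorization_pow_eq_self (by omega)
  calc smoothA i j ∣ ∏ p ∈ j.primeFactors, p ^ j.factorization p :=
        Finset.prod_dvd_prod_of_subset _ _ _ (Finset.filter_subset _ _)
    _ = j := hfull

theorem smoothA_two (j : ℕ) : smoothA 2 j = 1 := by
  unfold smoothA
  rw [Finset.filter_false_of_mem, Finset.prod_empty]
  intro p hp
  have := (Nat.prime_of_mem_primeFactors hp).two_le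
  omega

theorem partA_two (j : ℕ) : partA 2 j = j := by
  simp [partA, smoothA_two]

theorem partA_zero (i : ℕ) : partA i 0 = 0 := by
  simp [partA]

theorem partA_eq_totient (i j : ℕ) (hj : j < i) : partA i j = j.totient := by
  rcases Nat.eq_zero_or_pos j with h0 | h0
  · subst h0; simp [partA_zero]
  have hfilter : j.primeFactors.filter (fun p => p < i) = j.primeFactors := by
    refine Finset.filter_eq_self.mpr ?_
    intro p hp
    have := Nat.le_of_dvd h0 (Nat.dvd_of_mem_primeFactors hp)
    omega
  have hfull : smoothA i j = j := by
    unfold smoothA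
    rw [hfilter, ← Nat.support_factorization]
    exact Nat.prod_factorization_pow_eq_self (by omega)
  unfold partA
  rw [hfull, Nat.div_self h0, one_mul]

theorem partA_prime_self (i : ℕ) (hp : i.Prime) : partA i i = i := by
  have h1 : smoothA i i = 1 := by
    unfold smoothA
    rw [hp.primeFactors, Finset.filter_false_of_mem, Finset.prod_empty]
    intro p hpm
    rw [Finset.mem_singleton] at hpm
    omega
  unfold partA
  rw [h1, Nat.div_one, Nat.totient_one, mul_one]

theorem partA_comp_lt (i : ℕ) (h2 : 2 ≤ i) (hnp : ¬ i.Prime) : partA i i < i := by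
  set p := i.minFac with hpdef
  have hplt : p < i := (Nat.not_prime_iff_minFac_lt h2).mp hnp
  have hpp : p.Prime := Nat.minFac_prime (by omega)
  have hpmem : p ∈ i.primeFactors.filter (fun q => q < i) :=
    Finset.mem_filter.mpr ⟨Nat.mem_primeFactors.mpr ⟨hpp, Nat.minFac_dvd i, by omega⟩, hplt⟩
  have hv : 0 < i.factorization p :=
    hpp.factorization_pos_of_dvd (by omega) (Nat.minFac_dvd i)
  have hps : p ∣ smoothA i i :=
    dvd_trans (dvd_pow_self p (by omega)) (Finset.dvd_prod_of_mem _ hpmem)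
  have hs1 : 1 < smoothA i i := lt_of_lt_of_le hpp.one_lt (Nat.le_of_dvd (smoothA_pos i i) hps)
  have hsd : smoothA i i ∣ i := smoothA_dvd i i
  have hq : 0 < i / smoothA i i := Nat.div_pos (Nat.le_of_dvd (by omega) hsd) (smoothA_pos i i)
  calc partA i i < (i / smoothA i i) * smoothA i i :=
        mul_lt_mul_of_pos_left (Nat.totient_lt _ hs1) hq
    _ = i := Nat.div_mul_cancel hsd

theorem smoothA_succ_not_mem (i j : ℕ) (h : i ∉ j.primeFactors) :
    smoothA (i+1) j = smoothA i j := by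
  unfold smoothA
  congr 1
  ext p
  simp only [Finset.mem_filter]
  constructor
  · rintro ⟨hm, hlt⟩
    refine ⟨hm, ?_⟩
    rcases Nat.lt_succ_iff_lt_or_eq.mp hlt with h' | h'
    · exact h'
    · exact absurd (h' ▸ hm) h
  · rintro ⟨hm, hlt⟩
    exact ⟨hm, by omega⟩

theorem smoothA_succ_mem (i j : ℕ) (h : i ∈ j.primeFactors) :
    smoothA (i+1) j = smoothA i j * i ^ j.factorization i := by
  unfold smoothA
  have hins : j.primeFactors.filter (fun p => p < i + 1)
      = insert i (j.primeFactors.filter (fun p => p < i)) := by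
    ext p
    simp only [Finset.mem_filter, Finset.mem_insert]
    constructor
    · rintro ⟨hm, hlt⟩
      rcases Nat.lt_succ_iff_lt_or_eq.mp hlt with h' | h'
      · exact Or.inr ⟨hm, h'⟩
      · exact Or.inl h'
    · rintro (h' | ⟨hm, hlt⟩)
      · subst h'; exact ⟨h, by omega⟩
      · exact ⟨hm, by omega⟩
  rw [hins, Finset.prod_insert (by simp), mul_comm]

theorem smoothA_coprime (i j a : ℕ) (hp : i.Prime) : Nat.Coprime (smoothA i j) (i ^ a) := by
  refine Nat.Coprime.pow_right a (Nat.Coprime.prod_left ?_)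
  intro p hpm
  obtain ⟨hm, hlt⟩ := Finset.mem_filter.mp hpm
  refine Nat.Coprime.pow_left _ ?_
  exact (Nat.coprime_primes (Nat.prime_of_mem_primeFactors hm) hp).mpr (by omega)

theorem partA_step (i j : ℕ) (hp : i.Prime) (hij : i ∣ j) (hj : j ≠ 0) :
    ((partA i j : ℕ) : Int) - PySem.Int.floordiv ((partA i j : ℕ) : Int) ((i : ℕ) : Int)
      = ((partA (i+1) j : ℕ) : Int) := by
  have ha : 0 < j.factorization i := hp.factorization_pos_of_dvd hj hij
  set a := j.factorization i with hadef
  have hmem : i ∈ j.primeFactors := Nat.mem_primeFactors.mpr ⟨hp, hij, hj⟩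
  set s := smoothA i j with hsdef
  have hs' : smoothA (i+1) j = s * i ^ a := smoothA_succ_mem i j hmem
  have hs'd : smoothA (i+1) j ∣ j := smoothA_dvd (i+1) j
  set r := j / smoothA (i+1) j with hrdef
  have hr : smoothA (i+1) j * r = j := Nat.mul_div_cancel' hs'd
  have hj2 : j = s * (i ^ a * r) := by rw [← hr, hs']; ring
  have div1 : j / s = i ^ a * r := by
    rw [hj2, Nat.mul_div_cancel_left _ (smoothA_pos i j)]
  have tot : (smoothA (i+1) j).totient = s.totient * (i ^ (a-1) * (i-1)) := by
    rw [hs', Nat.totient_mul (smoothA_coprime i j a hp), Nat.totient_prime_pow hp ha]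
  have hpowa : i ^ a = i ^ (a-1) * i := by
    conv_lhs => rw [show a = (a-1)+1 by omega]
    rw [pow_succ]
  set Q := i ^ (a-1) * (r * s.totient) with hQ
  have e1 : partA i j = i * Q := by
    unfold partA
    rw [← hsdef, div1, hpowa, hQ]; ring
  have e2 : partA (i+1) j = (i-1) * Q := by
    unfold partA
    rw [← hrdef, tot, hQ]; ring
  rw [e1, PySem.Int.floordiv_natCast (i*Q) i, Nat.mul_div_cancel_left Q hp.pos, e2]
  have h1 : 1 ≤ i := hp.pos
  push_cast [Nat.cast_sub h1]
  ring

-- ---- A's sieve computes the totients ----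

def bodyA (max_one : Int) (t : List Int) (i : Int) : List Int :=
  if PySem.List.pyGetD t i 0 == i then
    (PySem.List.pyRange i max_one i).foldl
      (updBody (fun _ v => v - PySem.Int.floordiv v i)) t
  else t

theorem get_totients_eq (max_one : Int) :
    get_totients max_one
      = (PySem.List.pyRange 2 max_one 1).foldl (bodyA max_one)
          ((PySem.List.pyRange 0 max_one 1).foldl (updBody (fun j _ => j))
            (List.replicate max_one.toNat 0)) := rfl

theorem initA (max_one : Int) :
    ((PySem.List.pyRange 0 max_one 1).foldl (updBody (fun j _ => j))
        (List.replicate max_one.toNat 0)).length = max_one.toNat ∧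
    ∀ j : ℕ, j < max_one.toNat →
      PySem.List.pyGetD ((PySem.List.pyRange 0 max_one 1).foldl (updBody (fun j _ => j))
        (List.replicate max_one.toNat 0)) (j : Int) 0 = ((j : ℕ) : Int) := by
  have hlen := foldl_upd_length (fun j _ => j) (PySem.List.pyRange 0 max_one 1)
      (List.replicate max_one.toNat 0)
  rw [List.length_replicate] at hlen
  refine ⟨hlen, ?_⟩
  intro j hj
  have hget := foldl_upd_get (fun j _ => j) (PySem.List.pyRange 0 max_one 1)
      (List.replicate max_one.toNat 0) (PySem.List.pairwise_lt_pyRange_one 0 max_one)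
      (fun x hx => by
        obtain ⟨h1, h2⟩ := (PySem.List.mem_pyRange_one).mp hx
        rw [List.length_replicate]
        exact ⟨h1, by omega⟩)
      (j : Int) (by positivity)
  rw [hget, if_pos ((PySem.List.mem_pyRange_one).mpr ⟨by positivity, by omega⟩)]

theorem stepA (max_one : Int) (i : ℕ) (h2 : 2 ≤ i) (hiN : (i : Int) < max_one)
    (t : List Int) (hlen : t.length = max_one.toNat)
    (hInv : ∀ j : ℕ, j < max_one.toNat → PySem.List.pyGetD t (j : Int) 0 = (partA i j : Int)) :
    (bodyA max_one t (i : Int)).length = max_one.toNat ∧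
    ∀ j : ℕ, j < max_one.toNat →
      PySem.List.pyGetD (bodyA max_one t (i : Int)) (j : Int) 0 = (partA (i+1) j : Int) := by
  have hiN' : i < max_one.toNat := by omega
  have hread : PySem.List.pyGetD t (i : Int) 0 = (partA i i : Int) := hInv i hiN'
  unfold bodyA
  by_cases hp : i.Prime
  · have hself : partA i i = i := partA_prime_self i hp
    rw [hread, hself, if_pos (by simp)]
    have hpos : (0 : Int) < (i : Int) := by omega
    have hpw := pv_pyRange_pos_pairwise (i : Int) max_one (i : Int) hpos
    have hbnd : ∀ x ∈ PySem.List.pyRange (i : Int) max_one (i : Int),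
        0 ≤ x ∧ x < (t.length : Int) := by
      intro x hx
      obtain ⟨hx1, hx2, hx3⟩ := (PySem.List.mem_pyRange_iff_of_pos hpos x).mp hx
      exact ⟨by omega, by rw [hlen]; omega⟩
    constructor
    · exact (foldl_upd_length _ _ t).trans hlen
    · intro j hjN
      rw [foldl_upd_get (fun _ v => v - PySem.Int.floordiv v (i : Int))
        (PySem.List.pyRange (i : Int) max_one (i : Int)) t hpw hbnd (j : Int) (by positivity)]
      by_cases hjL : (j : Int) ∈ PySem.List.pyRange (i : Int) max_one (i : Int)
      · rw [if_pos hjL, hInv j hjN]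
        obtain ⟨hx1, hx2, hx3⟩ := (PySem.List.mem_pyRange_iff_of_pos hpos (j : Int)).mp hjL
        have hdvd : i ∣ j := by
          have : (i : Int) ∣ (j : Int) := (dvd_sub_right (dvd_refl _)).mp ?_
          · exact_mod_cast this
          · simpa using hx3
        exact partA_step i j hp hdvd (by omega)
      · rw [if_neg hjL, hInv j hjN]
        by_cases hdvd : i ∣ j
        · by_cases hij : i ≤ j
          · exfalso
            apply hjL
            refine (PySem.List.mem_pyRange_iff_of_pos hpos (j : Int)).mpr
              ⟨by omega, by omega, ?_⟩
            have : (i : Int) ∣ (j : Int) := by exact_mod_cast hdvd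
            exact dvd_sub this (dvd_refl _)
          · have hj0 : j = 0 := Nat.eq_zero_of_dvd_of_lt hdvd (by omega)
            rw [hj0, partA_zero, partA_zero]
        · have hnm : i ∉ j.primeFactors := fun hm => hdvd (Nat.dvd_of_mem_primeFactors hm)
          unfold partA
          rw [smoothA_succ_not_mem i j hnm]
  · have hlt := partA_comp_lt i h2 hp
    rw [hread, if_neg (by simp [beq_iff_eq]; omega)]
    refine ⟨hlen, ?_⟩
    intro j hjN
    rw [hInv j hjN]
    have hnm : i ∉ j.primeFactors := fun hm => hp (Nat.prime_of_mem_primeFactors hm)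
    unfold partA
    rw [smoothA_succ_not_mem i j hnm]

theorem sieveA (max_one : Int) : ∀ c : ℕ, (2 + (c : Int)) ≤ max_one →
    (((PySem.List.pyRange 2 (2 + (c : Int)) 1).foldl (bodyA max_one)
        ((PySem.List.pyRange 0 max_one 1).foldl (updBody (fun j _ => j))
          (List.replicate max_one.toNat 0))).length = max_one.toNat) ∧
    ∀ j : ℕ, j < max_one.toNat →
      PySem.List.pyGetD ((PySem.List.pyRange 2 (2 + (c : Int)) 1).foldl (bodyA max_one)
        ((PySem.List.pyRange 0 max_one 1).foldl (updBody (fun j _ => j))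
          (List.replicate max_one.toNat 0))) (j : Int) 0 = (partA (2 + c) j : Int) := by
  intro c
  induction c with
  | zero =>
    intro hc
    rw [show ((0 : ℕ) : Int) = 0 by rfl, add_zero, PySem.List.pyRange_one_eq_nil (le_refl 2),
      List.foldl_nil]
    obtain ⟨hl, hv⟩ := initA max_one
    exact ⟨hl, fun j hj => by rw [hv j hj, partA_two]⟩
  | succ c ih =>
    intro hc
    have hc' : (2 + (c : Int)) ≤ max_one := by push_cast at hc ⊢; omega
    obtain ⟨hl, hv⟩ := ih hc'
    have hsplit : PySem.List.pyRange 2 (2 + ((c + 1 : ℕ) : Int)) 1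
        = PySem.List.pyRange 2 (2 + (c : Int)) 1 ++ [2 + (c : Int)] := by
      push_cast
      rw [show (2 : Int) + ((c : Int) + 1) = (2 + (c : Int)) + 1 by ring]
      exact PySem.List.pyRange_one_succ_right (by omega)
    rw [hsplit, List.foldl_append, List.foldl_cons, List.foldl_nil]
    have hstep := stepA max_one (2 + c) (by omega) (by push_cast at hc ⊢; omega) _ hl hv
    rw [show ((2 + c : ℕ) : Int) = 2 + (c : Int) by push_cast; ring] at hstep
    exact ⟨hstep.1, fun j hj => by
      rw [hstep.2 j hj, show 2 + c + 1 = 2 + (c + 1) by ring]⟩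

theorem get_totients_spec (max_one : Int) :
    (get_totients max_one).length = max_one.toNat ∧
    ∀ j : ℕ, j < max_one.toNat →
      PySem.List.pyGetD (get_totients max_one) (j : Int) 0 = (Nat.totient j : Int) := by
  rw [get_totients_eq]
  by_cases hm : max_one ≤ 2
  · rw [PySem.List.pyRange_one_eq_nil hm, List.foldl_nil]
    obtain ⟨hl, hv⟩ := initA max_one
    refine ⟨hl, ?_⟩
    intro j hj
    rw [hv j hj]
    have : j ≤ 1 := by omega
    interval_cases j <;> simp
  · rw [not_le] at hm
    have hc : (2 + ((max_one - 2).toNat : Int)) = max_one := by omega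
    obtain ⟨hl, hv⟩ := sieveA max_one (max_one - 2).toNat (by omega)
    rw [hc] at hl hv
    refine ⟨hl, ?_⟩
    intro j hj
    rw [hv j hj, partA_eq_totient _ _ (by omega)]

-- ---- B's spf sieve computes smallest prime factors ----

def spfF (i j : ℕ) : ℕ :=
  if 2 ≤ j ∧ j.minFac < i ∧ j.minFac * j.minFac ≤ j then j.minFac else j

def bodyS (max_one : Int) (s : List Int) (i : Int) : List Int :=
  if PySem.List.pyGetD s i 0 == i then
    (PySem.List.pyRange (i * i) max_one i).foldl
      (fun s j => if PySem.List.pyGetD s j 0 == j then PySem.List.pySetD s j i else s) s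
  else s

def spfCalc (max_one : Int) : List Int :=
  (PySem.List.pyRange 2 max_one 1).foldl (bodyS max_one) (PySem.List.pyRange 0 max_one 1)

theorem spfF_two (j : ℕ) : spfF 2 j = j := by
  unfold spfF
  rw [if_neg]
  rintro ⟨h1, h2, h3⟩
  have := (Nat.minFac_prime (show j ≠ 1 by omega)).two_le
  omega

theorem spfF_succ_ne (i j : ℕ) (h : ¬(2 ≤ j ∧ j.minFac = i ∧ j.minFac * j.minFac ≤ j)) :
    spfF (i+1) j = spfF i j := by
  unfold spfF
  by_cases hb : 2 ≤ j ∧ j.minFac < i ∧ j.minFac * j.minFac ≤ j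
  · rw [if_pos hb, if_pos ⟨hb.1, by omega, hb.2.2⟩]
  · rw [if_neg hb, if_neg]
    rintro ⟨c1, c2, c3⟩
    refine hb ⟨c1, ?_, c3⟩
    have hne : j.minFac ≠ i := fun he => h ⟨c1, he, c3⟩
    omega

theorem spfF_step_mult (i j : ℕ) (hp : i.Prime) (hij : i ∣ j) (hsq : i * i ≤ j) :
    spfF (i+1) j = if spfF i j = j then (i : ℕ) else spfF i j := by
  have h2i : 2 ≤ i := hp.two_le
  have hj2 : 2 ≤ j := by nlinarith
  have hmf_le : j.minFac ≤ i := Nat.minFac_le_of_dvd h2i hij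
  have hsq' : j.minFac * j.minFac ≤ j := le_trans (Nat.mul_le_mul hmf_le hmf_le) hsq
  have hnew : spfF (i+1) j = j.minFac := by
    unfold spfF
    rw [if_pos ⟨hj2, by omega, hsq'⟩]
  by_cases hlt : j.minFac < i
  · have hold : spfF i j = j.minFac := by
      unfold spfF
      rw [if_pos ⟨hj2, hlt, hsq'⟩]
    have hne : j.minFac ≠ j := by nlinarith
    rw [hnew, hold, if_neg hne]
  · have heq : j.minFac = i := by omega
    have hold : spfF i j = j := by
      unfold spfF
      rw [if_neg]
      rintro ⟨c1, c2, c3⟩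
      omega
    rw [hnew, hold, if_pos rfl, heq]

theorem spfF_prime_self (i : ℕ) (hp : i.Prime) : spfF i i = i := by
  unfold spfF
  rw [if_neg]
  rintro ⟨c1, c2, c3⟩
  rw [Nat.Prime.minFac_eq hp] at c2
  omega

theorem spfF_comp_self (i : ℕ) (h2 : 2 ≤ i) (hnp : ¬ i.Prime) : spfF i i = i.minFac := by
  unfold spfF
  rw [if_pos]
  refine ⟨h2, (Nat.not_prime_iff_minFac_lt h2).mp hnp, ?_⟩
  have := Nat.minFac_sq_le_self (show 0 < i by omega) hnp
  nlinarith [this]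

theorem stepS (max_one : Int) (i : ℕ) (h2 : 2 ≤ i) (hiN : (i : Int) < max_one)
    (t : List Int) (hlen : t.length = max_one.toNat)
    (hInv : ∀ j : ℕ, j < max_one.toNat → PySem.List.pyGetD t (j : Int) 0 = (spfF i j : Int)) :
    (bodyS max_one t (i : Int)).length = max_one.toNat ∧
    ∀ j : ℕ, j < max_one.toNat →
      PySem.List.pyGetD (bodyS max_one t (i : Int)) (j : Int) 0 = (spfF (i+1) j : Int) := by
  have hiN' : i < max_one.toNat := by omega
  have hread : PySem.List.pyGetD t (i : Int) 0 = (spfF i i : Int) := hInv i hiN'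
  unfold bodyS
  by_cases hp : i.Prime
  · rw [hread, spfF_prime_self i hp, if_pos (by simp)]
    have hpos : (0 : Int) < (i : Int) := by omega
    set L := PySem.List.pyRange ((i : Int) * (i : Int)) max_one (i : Int) with hL
    have hconv : ∀ (s' : List Int), ∀ x ∈ L,
        (if PySem.List.pyGetD s' x 0 == x then PySem.List.pySetD s' x (i : Int) else s')
          = updBody (fun jj v => if v == jj then (i : Int) else v) s' x := by
      intro s' x hx
      obtain ⟨hx1, hx2, hx3⟩ := (PySem.List.mem_pyRange_iff_of_pos hpos x).mp hx
      by_cases hc : PySem.List.pyGetD s' x 0 = x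
      · simp [updBody, hc]
      · simp only [updBody, beq_iff_eq, if_neg hc]
        exact (pv_setD_getD_self s' x (by nlinarith)).symm
    rw [PySem.List.foldl_congr_mem L _ _ t hconv]
    have hpw := pv_pyRange_pos_pairwise ((i : Int) * (i : Int)) max_one (i : Int) hpos
    have hbnd : ∀ x ∈ L, 0 ≤ x ∧ x < (t.length : Int) := by
      intro x hx
      obtain ⟨hx1, hx2, hx3⟩ := (PySem.List.mem_pyRange_iff_of_pos hpos x).mp hx
      exact ⟨by nlinarith, by rw [hlen]; omega⟩
    constructor
    · exact (foldl_upd_length _ _ t).trans hlen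
    · intro j hjN
      rw [foldl_upd_get _ L t hpw hbnd (j : Int) (by positivity)]
      by_cases hjL : (j : Int) ∈ L
      · rw [if_pos hjL, hInv j hjN]
        obtain ⟨hx1, hx2, hx3⟩ := (PySem.List.mem_pyRange_iff_of_pos hpos (j : Int)).mp hjL
        have hdvd : i ∣ j := by
          have h1 : (i : Int) ∣ (j : Int) := by
            have hd3 : (i : Int) ∣ ((j : Int) - (i : Int) * (i : Int)) := hx3
            have h2 : (i : Int) ∣ (i : Int) * (i : Int) := Dvd.intro _ rfl
            simpa using dvd_add hd3 h2
          exact_mod_cast h1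
        have hsq : i * i ≤ j := by exact_mod_cast hx1
        rw [spfF_step_mult i j hp hdvd hsq]
        by_cases he : spfF i j = j
        · rw [if_pos (by simp only [beq_iff_eq]; exact_mod_cast he), if_pos he]
        · rw [if_neg (by
            simp only [beq_iff_eq]
            exact fun hc => he (by exact_mod_cast hc)), if_neg he]
      · rw [if_neg hjL, hInv j hjN]
        have hsame : spfF (i+1) j = spfF i j := by
          apply spfF_succ_ne
          rintro ⟨c1, c2, c3⟩
          apply hjL
          refine (PySem.List.mem_pyRange_iff_of_pos hpos (j : Int)).mpr ⟨?_, ?_, ?_⟩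
          · rw [← c2]; exact_mod_cast c3
          · omega
          · have hdvd : i ∣ j := c2 ▸ Nat.minFac_dvd j
            have h1 : (i : Int) ∣ (j : Int) := by exact_mod_cast hdvd
            have h2 : (i : Int) ∣ (i : Int) * (i : Int) := Dvd.intro _ rfl
            exact dvd_sub h1 h2
        rw [hsame]
  · have hcomp := spfF_comp_self i h2 hp
    have hmflt := (Nat.not_prime_iff_minFac_lt h2).mp hp
    rw [hread, hcomp, if_neg (by simp only [beq_iff_eq]; exact_mod_cast by omega)]
    refine ⟨hlen, ?_⟩
    intro j hjN
    rw [hInv j hjN]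
    have hsame : spfF (i+1) j = spfF i j := by
      apply spfF_succ_ne
      rintro ⟨c1, c2, c3⟩
      exact hp (c2 ▸ Nat.minFac_prime (show j ≠ 1 by omega))
    rw [hsame]

theorem initS (max_one : Int) :
    (PySem.List.pyRange 0 max_one 1).length = max_one.toNat ∧
    ∀ j : ℕ, j < max_one.toNat →
      PySem.List.pyGetD (PySem.List.pyRange 0 max_one 1) (j : Int) 0 = (spfF 2 j : Int) := by
  have hlen : (PySem.List.pyRange 0 max_one 1).length = max_one.toNat := by
    rw [PySem.List.length_pyRange_one]
    omega
  refine ⟨hlen, ?_⟩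
  intro j hj
  rw [spfF_two, PySem.List.pyGetD_eq_getElem _ 0 (by positivity) (by rw [hlen]; omega)]
  rw [PySem.List.getElem_pyRange_one 0 max_one _ (by rw [hlen] at *; omega)]
  omega

theorem sieveS (max_one : Int) : ∀ c : ℕ, (2 + (c : Int)) ≤ max_one →
    (((PySem.List.pyRange 2 (2 + (c : Int)) 1).foldl (bodyS max_one)
        (PySem.List.pyRange 0 max_one 1)).length = max_one.toNat) ∧
    ∀ j : ℕ, j < max_one.toNat →
      PySem.List.pyGetD ((PySem.List.pyRange 2 (2 + (c : Int)) 1).foldl (bodyS max_one)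
        (PySem.List.pyRange 0 max_one 1)) (j : Int) 0 = (spfF (2 + c) j : Int) := by
  intro c
  induction c with
  | zero =>
    intro hc
    rw [show ((0 : ℕ) : Int) = 0 by rfl, add_zero, PySem.List.pyRange_one_eq_nil (le_refl 2),
      List.foldl_nil]
    exact initS max_one
  | succ c ih =>
    intro hc
    have hc' : (2 + (c : Int)) ≤ max_one := by push_cast at hc ⊢; omega
    obtain ⟨hl, hv⟩ := ih hc'
    have hsplit : PySem.List.pyRange 2 (2 + ((c + 1 : ℕ) : Int)) 1
        = PySem.List.pyRange 2 (2 + (c : Int)) 1 ++ [2 + (c : Int)] := by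
      push_cast
      rw [show (2 : Int) + ((c : Int) + 1) = (2 + (c : Int)) + 1 by ring]
      exact PySem.List.pyRange_one_succ_right (by omega)
    rw [hsplit, List.foldl_append, List.foldl_cons, List.foldl_nil]
    have hstep := stepS max_one (2 + c) (by omega) (by push_cast at hc ⊢; omega) _ hl hv
    rw [show ((2 + c : ℕ) : Int) = 2 + (c : Int) by push_cast; ring] at hstep
    exact ⟨hstep.1, fun j hj => by
      rw [hstep.2 j hj, show 2 + c + 1 = 2 + (c + 1) by ring]⟩

theorem spf_spec (max_one : Int) :
    (spfCalc max_one).length = max_one.toNat ∧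
    ∀ j : ℕ, 2 ≤ j → j < max_one.toNat →
      PySem.List.pyGetD (spfCalc max_one) (j : Int) 0 = (j.minFac : Int) := by
  unfold spfCalc
  by_cases hm : max_one ≤ 2
  · rw [PySem.List.pyRange_one_eq_nil hm, List.foldl_nil]
    obtain ⟨hl, _⟩ := initS max_one
    exact ⟨hl, fun j hj2 hj => by omega⟩
  · rw [not_le] at hm
    have hc : (2 + ((max_one - 2).toNat : Int)) = max_one := by omega
    obtain ⟨hl, hv⟩ := sieveS max_one (max_one - 2).toNat (by omega)
    rw [hc] at hl hv
    refine ⟨hl, ?_⟩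
    intro j hj2 hj
    rw [hv j hj]
    have hiN : j.minFac < 2 + (max_one - 2).toNat := by
      have := Nat.minFac_le (show 0 < j by omega)
      omega
    by_cases hp : j.Prime
    · rw [show spfF (2 + (max_one - 2).toNat) j = j from ?_, Nat.Prime.minFac_eq hp]
      unfold spfF
      rw [if_neg]
      rintro ⟨c1, c2, c3⟩
      rw [Nat.Prime.minFac_eq hp] at c3
      nlinarith
    · unfold spfF
      rw [if_pos]
      refine ⟨hj2, hiN, ?_⟩
      have := Nat.minFac_sq_le_self (show 0 < j by omega) hp
      nlinarith [this]

-- ---- B's multiplicative recurrence fills in the totients ----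

def phiP (i k : ℕ) : Int := if k = 1 ∨ (2 ≤ k ∧ k < i) then ((Nat.totient k : ℕ) : Int) else 0

def phiInit (max_one : Int) : List Int :=
  if 1 < max_one then PySem.List.pySetD (List.replicate max_one.toNat 0) 1 1
  else List.replicate max_one.toNat 0

def bodyP (spf : List Int) (ph : List Int) (i : Int) : List Int :=
  let p := PySem.List.pyGetD spf i 0
  let m := PySem.Int.floordiv i p
  PySem.List.pySetD ph i
    (if PySem.Int.mod m p == 0 then PySem.List.pyGetD ph m 0 * p
     else PySem.List.pyGetD ph m 0 * (p - 1))

def phiCalc (max_one : Int) : List Int :=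
  (PySem.List.pyRange 2 max_one 1).foldl (bodyP (spfCalc max_one)) (phiInit max_one)

theorem initP (max_one : Int) :
    (phiInit max_one).length = max_one.toNat ∧
    ∀ k : ℕ, k < max_one.toNat →
      PySem.List.pyGetD (phiInit max_one) (k : Int) 0 = phiP 2 k := by
  unfold phiInit
  by_cases h1 : 1 < max_one
  · rw [if_pos h1]
    refine ⟨by rw [PySem.List.length_pySetD]; simp, ?_⟩
    intro k hk
    rw [pv_getD_setD _ 1 _ _ (by norm_num) (by simp; omega) (by positivity)]
    by_cases hk1 : (k : Int) = 1
    · have hke : k = 1 := by omega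
      subst hke
      norm_num [phiP]
    · rw [if_neg hk1, PySem.List.pyGetD_eq_getElem _ 0 (by positivity) (by simp; omega)]
      rw [List.getElem_replicate]
      unfold phiP
      rw [if_neg]
      rintro (hc | ⟨hc1, hc2⟩)
      · omega
      · omega
  · rw [if_neg h1]
    refine ⟨by simp, ?_⟩
    intro k hk
    have hk0 : k = 0 := by omega
    subst hk0
    rw [PySem.List.pyGetD_eq_getElem _ 0 (by positivity) (by simp; omega), List.getElem_replicate]
    simp [phiP]

theorem stepP (max_one : Int) (i : ℕ) (h2 : 2 ≤ i) (hiN : (i : Int) < max_one)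
    (ph : List Int) (hlen : ph.length = max_one.toNat)
    (hInv : ∀ k : ℕ, k < max_one.toNat → PySem.List.pyGetD ph (k : Int) 0 = phiP i k) :
    (bodyP (spfCalc max_one) ph (i : Int)).length = max_one.toNat ∧
    ∀ k : ℕ, k < max_one.toNat →
      PySem.List.pyGetD (bodyP (spfCalc max_one) ph (i : Int)) (k : Int) 0 = phiP (i+1) k := by
  have hiN' : i < max_one.toNat := by omega
  have hpprime : i.minFac.Prime := Nat.minFac_prime (by omega)
  have hpd : i.minFac ∣ i := Nat.minFac_dvd i
  have hspf := (spf_spec max_one).2 i h2 hiN'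
  set p := i.minFac with hpdef
  set m := i / p with hmdef
  have hpm : p * m = i := Nat.mul_div_cancel' hpd
  have hm1 : 1 ≤ m := Nat.div_pos (Nat.minFac_le (by omega)) hpprime.pos
  have hmlt : m < i := Nat.div_lt_self (by omega) hpprime.one_lt
  have hmval : PySem.List.pyGetD ph ((m : ℕ) : Int) 0 = ((Nat.totient m : ℕ) : Int) := by
    rw [hInv m (by omega)]
    unfold phiP
    rw [if_pos (by omega)]
  have hflo : PySem.Int.floordiv ((i : ℕ) : Int) ((p : ℕ) : Int) = ((m : ℕ) : Int) :=
    PySem.Int.floordiv_natCast i p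
  have hmod : PySem.Int.mod ((m : ℕ) : Int) ((p : ℕ) : Int) = (((m % p : ℕ) : ℕ) : Int) :=
    PySem.Int.mod_natCast m p
  simp only [bodyP]
  rw [hspf, hflo, hmod]
  have hval : (if ((((m % p : ℕ) : ℕ) : Int) == 0) = true
      then PySem.List.pyGetD ph ((m : ℕ) : Int) 0 * ((p : ℕ) : Int)
      else PySem.List.pyGetD ph ((m : ℕ) : Int) 0 * (((p : ℕ) : Int) - 1))
      = ((Nat.totient i : ℕ) : Int) := by
    rw [hmval]
    by_cases hd : p ∣ m
    · rw [if_pos (by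
        simp only [beq_iff_eq, Int.natCast_eq_zero]
        exact Nat.mod_eq_zero_of_dvd hd)]
      have ht : (p * m).totient = p * m.totient := Nat.totient_mul_of_prime_of_dvd hpprime hd
      rw [← hpm, ht]
      push_cast
      ring
    · rw [if_neg (by
        simp only [beq_iff_eq, Int.natCast_eq_zero]
        exact fun hc => hd (Nat.dvd_of_mod_eq_zero hc))]
      have hcop : Nat.Coprime p m := (Nat.Prime.coprime_iff_not_dvd hpprime).mpr hd
      have ht : (p * m).totient = p.totient * m.totient := Nat.totient_mul hcop
      rw [← hpm, ht, Nat.totient_prime hpprime]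
      push_cast [Nat.cast_sub hpprime.one_le]
      ring
  rw [hval]
  constructor
  · rw [PySem.List.length_pySetD, hlen]
  · intro k hk
    rw [pv_getD_setD ph _ _ _ (by positivity) (by rw [hlen]; omega) (by positivity)]
    by_cases hki : (k : Int) = (i : Int)
    · have hke : k = i := by omega
      subst hke
      rw [if_pos rfl]
      unfold phiP
      rw [if_pos (by omega)]
    · rw [if_neg hki, hInv k hk]
      have hkne : k ≠ i := by omega
      unfold phiP
      by_cases hc : k = 1 ∨ (2 ≤ k ∧ k < i)
      · rw [if_pos hc, if_pos (by omega)]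
      · rw [if_neg hc, if_neg (by omega)]

theorem sieveP (max_one : Int) : ∀ c : ℕ, (2 + (c : Int)) ≤ max_one →
    (((PySem.List.pyRange 2 (2 + (c : Int)) 1).foldl (bodyP (spfCalc max_one))
        (phiInit max_one)).length = max_one.toNat) ∧
    ∀ k : ℕ, k < max_one.toNat →
      PySem.List.pyGetD ((PySem.List.pyRange 2 (2 + (c : Int)) 1).foldl (bodyP (spfCalc max_one))
        (phiInit max_one)) (k : Int) 0 = phiP (2 + c) k := by
  intro c
  induction c with
  | zero =>
    intro hc
    rw [show ((0 : ℕ) : Int) = 0 by rfl, add_zero, PySem.List.pyRange_one_eq_nil (le_refl 2),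
      List.foldl_nil]
    exact initP max_one
  | succ c ih =>
    intro hc
    have hc' : (2 + (c : Int)) ≤ max_one := by push_cast at hc ⊢; omega
    obtain ⟨hl, hv⟩ := ih hc'
    have hsplit : PySem.List.pyRange 2 (2 + ((c + 1 : ℕ) : Int)) 1
        = PySem.List.pyRange 2 (2 + (c : Int)) 1 ++ [2 + (c : Int)] := by
      push_cast
      rw [show (2 : Int) + ((c : Int) + 1) = (2 + (c : Int)) + 1 by ring]
      exact PySem.List.pyRange_one_succ_right (by omega)
    rw [hsplit, List.foldl_append, List.foldl_cons, List.foldl_nil]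
    have hstep := stepP max_one (2 + c) (by omega) (by push_cast at hc ⊢; omega) _ hl hv
    rw [show ((2 + c : ℕ) : Int) = 2 + (c : Int) by push_cast; ring] at hstep
    exact ⟨hstep.1, fun k hk => by
      rw [hstep.2 k hk, show 2 + c + 1 = 2 + (c + 1) by ring]⟩

theorem phi_spec (max_one : Int) :
    (phiCalc max_one).length = max_one.toNat ∧
    ∀ k : ℕ, 2 ≤ k → k < max_one.toNat →
      PySem.List.pyGetD (phiCalc max_one) (k : Int) 0 = ((Nat.totient k : ℕ) : Int) := by
  unfold phiCalc
  by_cases hm : max_one ≤ 2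
  · rw [PySem.List.pyRange_one_eq_nil hm, List.foldl_nil]
    obtain ⟨hl, _⟩ := initP max_one
    exact ⟨hl, fun k hk2 hk => by omega⟩
  · rw [not_le] at hm
    have hc : (2 + ((max_one - 2).toNat : Int)) = max_one := by omega
    obtain ⟨hl, hv⟩ := sieveP max_one (max_one - 2).toNat (by omega)
    rw [hc] at hl hv
    refine ⟨hl, ?_⟩
    intro k hk2 hk
    rw [hv k hk]
    unfold phiP
    rw [if_pos (by omega)]

theorem solution_spec' : ∀ (max : Int), solution max = solution_alt max := by
  intro max
  have hA := get_totients_spec (max + 1)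
  have hB := phi_spec (max + 1)
  have eA : solution max = ((PySem.List.pyRange 2 (max+1) 1).foldl
      (fun (s : Int × Int) i =>
        let t := PySem.List.pyGetD (get_totients (max+1)) i 0
        if i * s.2 < s.1 * t ∧ has_same_digits i t = true then (i, t) else s) (1, 0)).1 := rfl
  have eB : solution_alt max = ((PySem.List.pyRange 2 (max+1) 1).foldl
      (fun (s : Int × Int) i =>
        let t := PySem.List.pyGetD (phiCalc (max+1)) i 0
        if i * s.2 < s.1 * t ∧ same_digits i t = true then (i, t) else s) (1, 0)).1 := rfl
  rw [eA, eB]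
  have hcong := PySem.List.foldl_congr_mem (PySem.List.pyRange 2 (max+1) 1)
      (fun (s : Int × Int) i =>
        let t := PySem.List.pyGetD (get_totients (max+1)) i 0
        if i * s.2 < s.1 * t ∧ has_same_digits i t = true then (i, t) else s)
      (fun (s : Int × Int) i =>
        let t := PySem.List.pyGetD (phiCalc (max+1)) i 0
        if i * s.2 < s.1 * t ∧ same_digits i t = true then (i, t) else s)
      ((1 : Int), (0 : Int)) ?_
  · rw [hcong]
  · intro acc x hx
    obtain ⟨hx1, hx2⟩ := (PySem.List.mem_pyRange_one).mp hx
    have hxj : ((x.toNat : ℕ) : Int) = x := by omega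
    have hAv := hA.2 x.toNat (by omega)
    have hBv := hB.2 x.toNat (by omega) (by omega)
    rw [hxj] at hAv hBv
    simp only
    rw [hAv, hBv, hsd_eq_sd]

-- ===== VERDICT (by name: the statement is the Claim_ definition above) =====
theorem solution_spec : Claim_equal_solution := by
  unfold Claim_equal_solution Spec_solution
  intro max _
  exact solution_spec' max
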